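-- pv_equiv track=rewrite | github.com/LEE-CHENYU/leviathan | Leviathan/islandExecution_agent_code_generation.py | _extract_executed_signature
-- ===== SOURCE A (Python) =====
-- from typing import List, Tuple, Optional
--
-- def _extract_executed_signature(
--
--     action_summary: Optional[dict],
--     message_summary: Optional[dict] = None,
-- ) -> tuple:
--     """Extract a signature based on executed actions/messages."""
--     if not action_summary and not message_summary:
--         return tuple()
--
--     tags = []
--     if action_summary:
--         for action, summary in action_summary.items():
--             try:
--                 outgoing = int(summary.get("outgoing_count", 0))
--             except (TypeError, ValueError, AttributeError):
--                 outgoing = 0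
--             if outgoing > 0:
--                 tags.append(action)
--
--     if message_summary and message_summary.get("sent_count", 0):
--         tags.append("message")
--
--     if not tags:
--         return tuple()
--
--     order = ("attack", "offer", "offer_land", "bear", "expand", "message")
--     ordered = [tag for tag in order if tag in tags]
--     extras = sorted(tag for tag in set(tags) if tag not in order)
--     return tuple(ordered + extras)
-- ===== SOURCE B (Python) =====
-- def _extract_executed_signature(action_summary, message_summary=None):
--     order = ("attack", "offer", "offer_land", "bear", "expand", "message")
--     rank = {t: i for i, t in enumerate(order)}
--     tags = set()
--     for action, summary in (action_summary or {}).items():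
--         if int(summary.get("outgoing_count", 0)) > 0:
--             tags.add(action)
--     if message_summary and message_summary.get("sent_count", 0):
--         tags.add("message")
--     return tuple(sorted(tags, key=lambda t: (rank.get(t, len(order)), t)))
-- ===== Notes on version B (the rewrite author's own statement) =====
-- stated objective: simpler
-- what changed: B collects the tags directly into a set and replaces A's two-pass ordering (priority-tuple filter pass concatenated with a separately sorted extras pass) by one keyed sort of the deduplicated tag set under the key (priority rank with rank.get default, tag), dropping both early returns.
import Mathlib
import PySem

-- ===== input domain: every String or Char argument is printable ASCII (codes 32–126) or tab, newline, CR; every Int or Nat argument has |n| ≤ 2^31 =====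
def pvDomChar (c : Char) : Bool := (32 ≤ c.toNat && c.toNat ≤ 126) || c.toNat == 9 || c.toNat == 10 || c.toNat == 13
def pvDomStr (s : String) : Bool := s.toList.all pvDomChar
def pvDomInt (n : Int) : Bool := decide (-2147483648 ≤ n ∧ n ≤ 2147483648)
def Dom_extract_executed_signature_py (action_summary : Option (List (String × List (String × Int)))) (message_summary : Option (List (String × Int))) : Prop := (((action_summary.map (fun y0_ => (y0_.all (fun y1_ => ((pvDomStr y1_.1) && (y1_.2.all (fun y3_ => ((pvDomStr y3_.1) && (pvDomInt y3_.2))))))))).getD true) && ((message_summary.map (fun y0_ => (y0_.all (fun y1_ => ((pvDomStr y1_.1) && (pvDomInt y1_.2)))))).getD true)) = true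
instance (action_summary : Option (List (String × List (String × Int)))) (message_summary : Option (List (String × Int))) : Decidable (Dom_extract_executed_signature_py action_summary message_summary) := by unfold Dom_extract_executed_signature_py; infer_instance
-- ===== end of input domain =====

-- B replaces A's two-pass ordering (priority-filtered list ++ separately sorted extras) by a single keyed
-- sort of the deduplicated tag set under the key (priority rank, tag); objective: simpler.
-- The summaries are dict[str, int]-shaped here, so Python's int(...) is the identity and A's
-- try/except can never fire; the ports reflect that.

-- the priority tuple, a literal both Pythons contain
def pvOrder : List String := ["attack", "offer", "offer_land", "bear", "expand", "message"]

-- ===== PORT A =====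
def extract_executed_signature_py (action_summary : Option (List (String × List (String × Int)))) (message_summary : Option (List (String × Int))) : List String :=
  -- truthiness of the two optional dicts (None and the empty dict are falsy)
  let aTruthy : Bool := match action_summary with | none => false | some l => !l.isEmpty
  let mTruthy : Bool := match message_summary with | none => false | some l => !l.isEmpty
  if !aTruthy && !mTruthy then []
  else
    let tags0 : List String :=
      if aTruthy then
        (action_summary.getD []).foldl (fun acc p =>
          -- int(summary.get("outgoing_count", 0)): the value is an int, so int() is the identity
          if (PySem.Dict.getD ⟨p.2⟩ "outgoing_count" 0 : Int) > 0 then acc ++ [p.1] else acc) []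
      else []
    let tags : List String :=
      if mTruthy && !(PySem.Dict.getD ⟨message_summary.getD []⟩ "sent_count" 0 == 0)
      then tags0 ++ ["message"] else tags0
    if tags.isEmpty then []
    else
      let ordered : List String := pvOrder.filter (fun t => tags.contains t)
      let extras : List String :=
        PySem.List.sorted ((PySem.Set.ofList tags).filter (fun t => !pvOrder.contains t)) (fun t => t) false
      ordered ++ extras

-- ===== PORT B =====
-- rank = {t: i for i, t in enumerate(order)}
def pvRankDict : PySem.Dict String Int :=
  (PySem.List.enumerate pvOrder 0).foldl (fun d p => d.insert p.2 p.1) PySem.Dict.empty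
-- the sort key's first component: rank.get(t, len(order))
def pvRk (t : String) : Int := PySem.Dict.getD pvRankDict t (pvOrder.length : Int)

def extract_executed_signature_py_alt (action_summary : Option (List (String × List (String × Int)))) (message_summary : Option (List (String × Int))) : List String :=
  let tags0 : PySem.Set String :=
    (action_summary.getD []).foldl (fun s p =>
      if (PySem.Dict.getD ⟨p.2⟩ "outgoing_count" 0 : Int) > 0 then PySem.Set.add s p.1 else s)
      PySem.Set.empty
  let mTruthy : Bool := match message_summary with | none => false | some l => !l.isEmpty
  let tags : PySem.Set String :=
    if mTruthy && !(PySem.Dict.getD ⟨message_summary.getD []⟩ "sent_count" 0 == 0)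
    then PySem.Set.add tags0 "message" else tags0
  -- sorted(tags, key=lambda t: (rank.get(t, len(order)), t))
  PySem.List.sorted2 tags (fun t => pvRk t) (fun t => t) false

-- ===== PRECONDITION & SPEC =====
def Spec_extract_executed_signature_py (action_summary : Option (List (String × List (String × Int)))) (message_summary : Option (List (String × Int))) (out : List String) : Prop := out = extract_executed_signature_py_alt action_summary message_summary
instance (action_summary : Option (List (String × List (String × Int)))) (message_summary : Option (List (String × Int))) (out : List String) : Decidable (Spec_extract_executed_signature_py action_summary message_summary out) := by unfold Spec_extract_executed_signature_py; infer_instance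

-- ===== CLAIM (what is proved, stated in full; the proofs are below) =====
def Claim_equal_extract_executed_signature_py : Prop := ∀ (action_summary : Option (List (String × List (String × Int)))) (message_summary : Option (List (String × Int))), Dom_extract_executed_signature_py action_summary message_summary → Spec_extract_executed_signature_py action_summary message_summary (extract_executed_signature_py action_summary message_summary)

-- ===== LEMMAS AND PROOFS =====

-- B's tuple key (pvRk t, t) ordered lexicographically, as one key into Int ×ₗ String
def pvK (t : String) : Lex (Int × String) := toLex (pvRk t, t)

-- sorted2 with key components (pvRk, id) is sorted with the single lexicographic key pvK
theorem pv_sorted2_toLex (xs : List String) :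
    PySem.List.sorted2 xs (fun t => pvRk t) (fun t => t) false
      = PySem.List.sorted xs pvK false := by
  simp only [PySem.List.sorted2, PySem.List.sorted]
  congr 1
  funext acc x
  congr 1
  funext a b
  show (decide (pvRk a < pvRk b) || (!decide (pvRk b < pvRk a) && decide (a < b)))
      = decide (pvK a < pvK b)
  rcases lt_trichotomy (pvRk a) (pvRk b) with h | h | h
  · simp [pvK, Prod.Lex.lt_iff, h, lt_asymm h]
  · simp [pvK, Prod.Lex.lt_iff, h]
  · simp [pvK, Prod.Lex.lt_iff, h, lt_asymm h, h.ne']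

theorem pvOrder_pairwise : pvOrder.Pairwise (fun a b => pvK a < pvK b) := by
  decide

theorem pvRk_of_mem (t : String) (h : t ∈ pvOrder) : pvRk t < 6 := by
  fin_cases h <;> decide

theorem pvRk_of_not_mem (t : String) (h : t ∉ pvOrder) : pvRk t = 6 := by
  simp only [pvOrder, List.mem_cons, not_or] at h
  obtain ⟨h1, h2, h3, h4, h5, h6⟩ := h
  simp [pvRk, pvRankDict, pvOrder, PySem.List.enumerate, PySem.Dict.getD, PySem.Dict.get?,
    PySem.Dict.insert, PySem.Dict.empty, List.find?,
    beq_eq_false_iff_ne.2 (Ne.symm h1), beq_eq_false_iff_ne.2 (Ne.symm h2),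
    beq_eq_false_iff_ne.2 (Ne.symm h3), beq_eq_false_iff_ne.2 (Ne.symm h4),
    beq_eq_false_iff_ne.2 (Ne.symm h5), beq_eq_false_iff_ne.2 (Ne.symm h6.1)]

-- A's result is a permutation of the deduplicated tag set …
theorem pv_perm (tags : List String) :
    (pvOrder.filter (fun t => tags.contains t) ++
      PySem.List.sorted ((PySem.Set.ofList tags).filter (fun t => !pvOrder.contains t)) (fun t => t) false).Perm
    (PySem.Set.ofList tags) := by
  have h1 : (pvOrder.filter (fun t => tags.contains t)).Perm
      ((PySem.Set.ofList tags).filter (fun t => pvOrder.contains t)) := by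
    rw [List.perm_ext_iff_of_nodup ((by decide : pvOrder.Nodup).filter _)
        ((PySem.Set.nodup_ofList tags).filter _)]
    intro a
    simp [List.mem_filter, PySem.Set.mem_ofList, and_comm]
  have h2 := PySem.List.sorted_perm ((PySem.Set.ofList tags).filter (fun t => !pvOrder.contains t)) (fun t => t) false
  exact (h1.append h2).trans (List.filter_append_perm _ _)

-- … and is strictly increasing under B's key
theorem pv_pairwise (tags : List String) :
    (pvOrder.filter (fun t => tags.contains t) ++
      PySem.List.sorted ((PySem.Set.ofList tags).filter (fun t => !pvOrder.contains t)) (fun t => t) false).Pairwise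
    (fun a b => pvK a < pvK b) := by
  rw [List.pairwise_append]
  refine ⟨List.Pairwise.sublist (List.filter_sublist) pvOrder_pairwise, ?_, ?_⟩
  · have hperm := PySem.List.sorted_perm ((PySem.Set.ofList tags).filter (fun t => !pvOrder.contains t)) (fun t => t) false
    have hnd : (PySem.List.sorted ((PySem.Set.ofList tags).filter (fun t => !pvOrder.contains t)) (fun t => t) false).Nodup :=
      hperm.nodup_iff.2 ((PySem.Set.nodup_ofList tags).filter _)
    have hle := PySem.List.sorted_pairwise ((PySem.Set.ofList tags).filter (fun t => !pvOrder.contains t)) (fun t => t)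
    have hlt : (PySem.List.sorted ((PySem.Set.ofList tags).filter (fun t => !pvOrder.contains t)) (fun t => t) false).Pairwise (· < ·) :=
      (hle.and hnd).imp (fun h => lt_of_le_of_ne h.1 h.2)
    refine hlt.imp_of_mem (fun {a b} ha hb hab => ?_)
    have ha' : a ∉ pvOrder := by
      have := hperm.mem_iff.1 ha
      simp [List.mem_filter] at this
      exact this.2
    have hb' : b ∉ pvOrder := by
      have := hperm.mem_iff.1 hb
      simp [List.mem_filter] at this
      exact this.2
    show pvK a < pvK b
    rw [pvK, pvK, Prod.Lex.lt_iff]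
    right
    exact ⟨by simp [pvRk_of_not_mem a ha', pvRk_of_not_mem b hb'], hab⟩
  · intro a ha b hb
    have ha' : a ∈ pvOrder := (List.mem_filter.1 ha).1
    have hb' : b ∉ pvOrder := by
      have := (PySem.List.sorted_perm _ _ _).mem_iff.1 hb
      simp [List.mem_filter] at this
      exact this.2
    show pvK a < pvK b
    rw [pvK, pvK, Prod.Lex.lt_iff]
    left
    rw [pvRk_of_not_mem b hb']
    exact pvRk_of_mem a ha'

-- the heart: A's ordered ++ extras IS the keyed sort of set(tags)
theorem pv_main (tags : List String) :
    pvOrder.filter (fun t => tags.contains t) ++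
      PySem.List.sorted ((PySem.Set.ofList tags).filter (fun t => !pvOrder.contains t)) (fun t => t) false
    = PySem.List.sorted2 (PySem.Set.ofList tags) (fun t => pvRk t) (fun t => t) false := by
  rw [pv_sorted2_toLex]
  exact (PySem.List.sorted_eq_of_perm_of_pairwise_lt _ _ pvK (pv_perm tags) (pv_pairwise tags)).symm

-- building the tag collection as a set is deduplicating A's tag list
theorem pv_fold (l : List (String × List (String × Int))) (t : List String) :
    l.foldl (fun s p =>
        if (PySem.Dict.getD ⟨p.2⟩ "outgoing_count" 0 : Int) > 0 then PySem.Set.add s p.1 else s)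
      (PySem.Set.ofList t)
    = PySem.Set.ofList (l.foldl (fun acc p =>
        if (PySem.Dict.getD ⟨p.2⟩ "outgoing_count" 0 : Int) > 0 then acc ++ [p.1] else acc) t) := by
  induction l generalizing t with
  | nil => rfl
  | cons p l ih =>
    simp only [List.foldl_cons]
    by_cases h : (PySem.Dict.getD ⟨p.2⟩ "outgoing_count" 0 : Int) > 0
    · simp only [h, if_pos, ← PySem.Set.ofList_append_singleton, ih]
    · simp only [h, ih, if_false]

-- empty-guard absorbed: the final block of A equals the keyed sort for ANY tag list
theorem pv_finish (tagsA : List String) :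
    (if tagsA.isEmpty then [] else
      pvOrder.filter (fun t => tagsA.contains t) ++
        PySem.List.sorted ((PySem.Set.ofList tagsA).filter (fun t => !pvOrder.contains t)) (fun t => t) false)
    = PySem.List.sorted2 (PySem.Set.ofList tagsA) (fun t => pvRk t) (fun t => t) false := by
  by_cases h : tagsA = []
  · subst h; rfl
  · rw [if_neg (by simp [h]), pv_main]

-- the two tag collections, combined: A's final block on the list version equals B's keyed sort of the set version
theorem pv_combine (al : List (String × List (String × Int))) (c : Bool) :
    (if (if c then (al.foldl (fun acc p =>
          if (PySem.Dict.getD ⟨p.2⟩ "outgoing_count" 0 : Int) > 0 then acc ++ [p.1] else acc) []) ++ ["message"]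
        else al.foldl (fun acc p =>
          if (PySem.Dict.getD ⟨p.2⟩ "outgoing_count" 0 : Int) > 0 then acc ++ [p.1] else acc) []).isEmpty then []
     else
      pvOrder.filter (fun t => (if c then (al.foldl (fun acc p =>
          if (PySem.Dict.getD ⟨p.2⟩ "outgoing_count" 0 : Int) > 0 then acc ++ [p.1] else acc) []) ++ ["message"]
        else al.foldl (fun acc p =>
          if (PySem.Dict.getD ⟨p.2⟩ "outgoing_count" 0 : Int) > 0 then acc ++ [p.1] else acc) []).contains t) ++
        PySem.List.sorted ((PySem.Set.ofList (if c then (al.foldl (fun acc p =>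
          if (PySem.Dict.getD ⟨p.2⟩ "outgoing_count" 0 : Int) > 0 then acc ++ [p.1] else acc) []) ++ ["message"]
        else al.foldl (fun acc p =>
          if (PySem.Dict.getD ⟨p.2⟩ "outgoing_count" 0 : Int) > 0 then acc ++ [p.1] else acc) [])).filter
          (fun t => !pvOrder.contains t)) (fun t => t) false)
    = PySem.List.sorted2
        (if c then PySem.Set.add (al.foldl (fun s p =>
            if (PySem.Dict.getD ⟨p.2⟩ "outgoing_count" 0 : Int) > 0 then PySem.Set.add s p.1 else s)
            PySem.Set.empty) "message"
         else al.foldl (fun s p =>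
            if (PySem.Dict.getD ⟨p.2⟩ "outgoing_count" 0 : Int) > 0 then PySem.Set.add s p.1 else s)
            PySem.Set.empty)
        (fun t => pvRk t) (fun t => t) false := by
  have h0 : al.foldl (fun s p =>
        if (PySem.Dict.getD ⟨p.2⟩ "outgoing_count" 0 : Int) > 0 then PySem.Set.add s p.1 else s)
        PySem.Set.empty
      = PySem.Set.ofList (al.foldl (fun acc p =>
        if (PySem.Dict.getD ⟨p.2⟩ "outgoing_count" 0 : Int) > 0 then acc ++ [p.1] else acc) []) :=
    pv_fold al []
  have hB : (if c then PySem.Set.add (al.foldl (fun s p =>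
            if (PySem.Dict.getD ⟨p.2⟩ "outgoing_count" 0 : Int) > 0 then PySem.Set.add s p.1 else s)
            PySem.Set.empty) "message"
         else al.foldl (fun s p =>
            if (PySem.Dict.getD ⟨p.2⟩ "outgoing_count" 0 : Int) > 0 then PySem.Set.add s p.1 else s)
            PySem.Set.empty)
      = PySem.Set.ofList (if c then (al.foldl (fun acc p =>
          if (PySem.Dict.getD ⟨p.2⟩ "outgoing_count" 0 : Int) > 0 then acc ++ [p.1] else acc) []) ++ ["message"]
        else al.foldl (fun acc p =>
          if (PySem.Dict.getD ⟨p.2⟩ "outgoing_count" 0 : Int) > 0 then acc ++ [p.1] else acc) []) := by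
    cases c
    · simpa using h0
    · have := congrArg (fun s => PySem.Set.add s "message") h0
      simpa [PySem.Set.ofList_append_singleton] using this
  rw [hB]
  exact pv_finish _

-- ===== VERDICT (by name: the statement is the Claim_ definition above) =====
theorem extract_executed_signature_py_spec : Claim_equal_extract_executed_signature_py := by
  intro a m _
  unfold Spec_extract_executed_signature_py
  cases a with
  | none =>
    cases m with
    | none => rfl
    | some w =>
      by_cases hw : w = []
      · subst hw; rfl
      · simp only [extract_executed_signature_py, extract_executed_signature_py_alt,
          Option.getD_some, Option.getD_none]
        rw [show w.isEmpty = false by simp [hw]]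
        exact pv_combine [] _
  | some l =>
    by_cases hl : l = []
    · subst hl
      cases m with
      | none => rfl
      | some w =>
        by_cases hw : w = []
        · subst hw; rfl
        · simp only [extract_executed_signature_py, extract_executed_signature_py_alt,
          Option.getD_some, Option.getD_none]
          rw [show w.isEmpty = false by simp [hw], show ([] : List (String × List (String × Int))).isEmpty = true from rfl]
          exact pv_combine [] _
    · cases m with
      | none =>
        simp only [extract_executed_signature_py, extract_executed_signature_py_alt,
          Option.getD_some, Option.getD_none]
        rw [show l.isEmpty = false by simp [hl]]
        exact pv_combine l false
      | some w =>
        simp only [extract_executed_signature_py, extract_executed_signature_py_alt,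
          Option.getD_some, Option.getD_none]
        rw [show l.isEmpty = false by simp [hl]]
        exact pv_combine l _
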